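-- pv_equiv track=rewrite | github.com/Nostraxiten/noxtools | noxsee.py | identify_country_and_type
-- ===== SOURCE A (Python) =====
-- def identify_country_and_type(phone_number):
--     country_codes = {'1': 'USA/CA', '34': 'España', '33': 'Francia', '44': 'UK', '49': 'Alemania', '52': 'México', '54': 'Argentina', '57': 'Colombia'}
--     clean = phone_number[1:]
--     country, line_type, country_code = 'Desconocido', 'No identificado', ''
--
--     for length in [3, 2, 1]:
--         code = clean[:length]
--         if code in country_codes:
--             country = country_codes[code]
--             country_code = code
--             break
--
--     if country_code == '34':
--         first = clean[2:3]
--         line_type = "Móvil" if first in ['6', '7'] else "Fijo" if first in ['8', '9'] else "Especial"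
--     return country, line_type, country_code
-- ===== SOURCE B (Python) =====
-- def identify_country_and_type(phone_number):
--     clean = phone_number[1:]
--     two = clean[:2]
--     if two == '34':
--         d = clean[2:3]
--         if d in ('6', '7'):
--             lt = "Móvil"
--         elif d in ('8', '9'):
--             lt = "Fijo"
--         else:
--             lt = "Especial"
--         return ('España', lt, '34')
--     if two == '33':
--         return ('Francia', 'No identificado', '33')
--     if two == '44':
--         return ('UK', 'No identificado', '44')
--     if two == '49':
--         return ('Alemania', 'No identificado', '49')
--     if two == '52':
--         return ('México', 'No identificado', '52')
--     if two == '54':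
--         return ('Argentina', 'No identificado', '54')
--     if two == '57':
--         return ('Colombia', 'No identificado', '57')
--     if clean[:1] == '1':
--         return ('USA/CA', 'No identificado', '1')
--     return ('Desconocido', 'No identificado', '')
-- ===== Notes on version B (the rewrite author's own statement) =====
-- stated objective: simpler
-- what changed: B drops the country-code dict and the length-probe loop entirely: it is a flat early-return chain that compares the first two (or one) characters of the cleaned number against each known code directly.
import Mathlib
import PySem

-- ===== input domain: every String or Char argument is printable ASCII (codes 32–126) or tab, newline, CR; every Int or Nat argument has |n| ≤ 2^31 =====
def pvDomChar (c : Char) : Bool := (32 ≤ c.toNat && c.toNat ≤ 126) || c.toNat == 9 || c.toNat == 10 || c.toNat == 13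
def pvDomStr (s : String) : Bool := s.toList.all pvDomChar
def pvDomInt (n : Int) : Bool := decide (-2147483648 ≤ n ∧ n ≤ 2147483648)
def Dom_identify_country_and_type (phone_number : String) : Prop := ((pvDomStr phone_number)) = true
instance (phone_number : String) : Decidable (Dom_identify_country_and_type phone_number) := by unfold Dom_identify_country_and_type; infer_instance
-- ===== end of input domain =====

-- B replaces A's dict + length-probe loop by a flat early-return chain comparing the first characters directly (simpler decomposition, same cost).


-- ===== PORT A =====
def pvCodesA : PySem.Dict String String :=
  PySem.Dict.ofList [("1", "USA/CA"), ("34", "España"), ("33", "Francia"), ("44", "UK"),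
    ("49", "Alemania"), ("52", "México"), ("54", "Argentina"), ("57", "Colombia")]

-- the 'for length in [3, 2, 1]' loop with its break
def pvProbe (clean : List Char) : List Int → String × String
  | [] => ("Desconocido", "")
  | len :: rest =>
    let code := String.ofList (PySem.List.slice clean none (some len))
    match pvCodesA.get? code with
    | some c => (c, code)
    | none => pvProbe clean rest

def identify_country_and_type (phone_number : String) : String × String × String :=
  let clean := PySem.List.slice phone_number.toList (some 1) none
  let cc := pvProbe clean [3, 2, 1]
  let line_type :=
    if cc.2 = "34" then
      let first := String.ofList (PySem.List.slice clean (some 2) (some 3))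
      if first = "6" ∨ first = "7" then "Móvil"
      else if first = "8" ∨ first = "9" then "Fijo"
      else "Especial"
    else "No identificado"
  (cc.1, line_type, cc.2)

-- ===== PORT B =====
-- Source B: no dict, no loop — an early-return chain on the first two (or one) characters
def identify_country_and_type_alt (phone_number : String) : String × String × String :=
  let clean := PySem.List.slice phone_number.toList (some 1) none
  let two := String.ofList (PySem.List.slice clean none (some 2))
  if two = "34" then
    let d := String.ofList (PySem.List.slice clean (some 2) (some 3))
    let lt :=
      if d = "6" ∨ d = "7" then "Móvil"
      else if d = "8" ∨ d = "9" then "Fijo"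
      else "Especial"
    ("España", lt, "34")
  else if two = "33" then ("Francia", "No identificado", "33")
  else if two = "44" then ("UK", "No identificado", "44")
  else if two = "49" then ("Alemania", "No identificado", "49")
  else if two = "52" then ("México", "No identificado", "52")
  else if two = "54" then ("Argentina", "No identificado", "54")
  else if two = "57" then ("Colombia", "No identificado", "57")
  else if String.ofList (PySem.List.slice clean none (some 1)) = "1" then ("USA/CA", "No identificado", "1")
  else ("Desconocido", "No identificado", "")

-- ===== PRECONDITION & SPEC =====
def Spec_identify_country_and_type (phone_number : String) (out : String × String × String) : Prop := out = identify_country_and_type_alt phone_number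
instance (phone_number : String) (out : String × String × String) : Decidable (Spec_identify_country_and_type phone_number out) := by unfold Spec_identify_country_and_type; infer_instance

-- ===== CLAIM (what is proved, stated in full; the proofs are below) =====
def Claim_equal_identify_country_and_type : Prop := ∀ (phone_number : String), Dom_identify_country_and_type phone_number → Spec_identify_country_and_type phone_number (identify_country_and_type phone_number)

-- ===== LEMMAS AND PROOFS =====

theorem getA_eq (l : List Char) : pvCodesA.get? (String.ofList l) =
    if ['1'] = l then some "USA/CA" else if ['3','4'] = l then some "España"
    else if ['3','3'] = l then some "Francia" else if ['4','4'] = l then some "UK"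
    else if ['4','9'] = l then some "Alemania" else if ['5','2'] = l then some "México"
    else if ['5','4'] = l then some "Argentina" else if ['5','7'] = l then some "Colombia"
    else none := by
  simp only [show pvCodesA = PySem.Dict.mk [("1", "USA/CA"), ("34", "España"), ("33", "Francia"),
      ("44", "UK"), ("49", "Alemania"), ("52", "México"), ("54", "Argentina"), ("57", "Colombia")] from rfl,
    PySem.Dict.get?_mk_cons,
    show ("1":String) = String.ofList ['1'] from rfl, show ("34":String) = String.ofList ['3','4'] from rfl,
    show ("33":String) = String.ofList ['3','3'] from rfl, show ("44":String) = String.ofList ['4','4'] from rfl,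
    show ("49":String) = String.ofList ['4','9'] from rfl, show ("52":String) = String.ofList ['5','2'] from rfl,
    show ("54":String) = String.ofList ['5','4'] from rfl, show ("57":String) = String.ofList ['5','7'] from rfl,
    beq_iff_eq, String.ofList_inj,
    show ∀ k, (PySem.Dict.mk ([] : List (String×String))).get? k = none from fun _ => rfl]

theorem pvSliceTake (xs : List Char) (n : Nat) :
    PySem.List.slice xs none (some (n : Int)) = xs.take n := PySem.List.slice_to_natCast xs n

theorem pvEqFlip {α : Type} (x y : α) : (x = y) = (y = x) := propext eq_comm

set_option maxHeartbeats 1000000 in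
theorem identify_country_and_type_spec : Claim_equal_identify_country_and_type := by
  intro s _
  show identify_country_and_type s = identify_country_and_type_alt s
  simp only [identify_country_and_type, identify_country_and_type_alt]
  generalize PySem.List.slice s.toList (some 1) none = l
  simp only [pvProbe,
    show ((3:Int) = ((3:Nat):Int)) from rfl, show ((2:Int) = ((2:Nat):Int)) from rfl,
    show ((1:Int) = ((1:Nat):Int)) from rfl,
    pvSliceTake, getA_eq,
    show ("34":String) = String.ofList ['3','4'] from rfl,
    show ("33":String) = String.ofList ['3','3'] from rfl,
    show ("44":String) = String.ofList ['4','4'] from rfl,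
    show ("49":String) = String.ofList ['4','9'] from rfl,
    show ("52":String) = String.ofList ['5','2'] from rfl,
    show ("54":String) = String.ofList ['5','4'] from rfl,
    show ("57":String) = String.ofList ['5','7'] from rfl,
    show ("1":String) = String.ofList ['1'] from rfl,
    String.ofList_inj]
  simp only [pvEqFlip]
  match l with
  | [] => rfl
  | [a] =>
    simp only [List.take_succ_cons, List.take_nil, List.cons.injEq, reduceCtorEq, and_true, and_false, if_false]
    by_cases h1 : '1' = a
    · subst h1; rfl
    · simp only [if_neg h1]; rfl
  | [a, b] =>
    simp only [List.take_succ_cons, List.take_nil, List.take_zero, List.cons.injEq, reduceCtorEq, and_true, and_false, if_false]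
    by_cases h34 : '3' = a ∧ '4' = b
    · obtain ⟨rfl, rfl⟩ := h34; rfl
    · simp only [if_neg h34]
      by_cases h33 : '3' = a ∧ '3' = b
      · obtain ⟨rfl, rfl⟩ := h33; rfl
      · simp only [if_neg h33]
        by_cases h44 : '4' = a ∧ '4' = b
        · obtain ⟨rfl, rfl⟩ := h44; rfl
        · simp only [if_neg h44]
          by_cases h49 : '4' = a ∧ '9' = b
          · obtain ⟨rfl, rfl⟩ := h49; rfl
          · simp only [if_neg h49]
            by_cases h52 : '5' = a ∧ '2' = b
            · obtain ⟨rfl, rfl⟩ := h52; rfl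
            · simp only [if_neg h52]
              by_cases h54 : '5' = a ∧ '4' = b
              · obtain ⟨rfl, rfl⟩ := h54; rfl
              · simp only [if_neg h54]
                by_cases h57 : '5' = a ∧ '7' = b
                · obtain ⟨rfl, rfl⟩ := h57; rfl
                · simp only [if_neg h57]
                  by_cases h1 : '1' = a
                  · subst h1; rfl
                  · simp only [if_neg h1]; rfl
  | a :: b :: c :: t =>
    simp only [List.take_succ_cons, List.take_zero, List.cons.injEq, reduceCtorEq, and_true, and_false, if_false]
    by_cases h34 : '3' = a ∧ '4' = b
    · obtain ⟨rfl, rfl⟩ := h34; rfl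
    · simp only [if_neg h34]
      by_cases h33 : '3' = a ∧ '3' = b
      · obtain ⟨rfl, rfl⟩ := h33; rfl
      · simp only [if_neg h33]
        by_cases h44 : '4' = a ∧ '4' = b
        · obtain ⟨rfl, rfl⟩ := h44; rfl
        · simp only [if_neg h44]
          by_cases h49 : '4' = a ∧ '9' = b
          · obtain ⟨rfl, rfl⟩ := h49; rfl
          · simp only [if_neg h49]
            by_cases h52 : '5' = a ∧ '2' = b
            · obtain ⟨rfl, rfl⟩ := h52; rfl
            · simp only [if_neg h52]
              by_cases h54 : '5' = a ∧ '4' = b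
              · obtain ⟨rfl, rfl⟩ := h54; rfl
              · simp only [if_neg h54]
                by_cases h57 : '5' = a ∧ '7' = b
                · obtain ⟨rfl, rfl⟩ := h57; rfl
                · simp only [if_neg h57]
                  by_cases h1 : '1' = a
                  · subst h1; rfl
                  · simp only [if_neg h1]; rfl
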